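-- pv_equiv track=rewrite | github.com/nickyiliwang/ds_algo | Fundamentals/recurrsion-basics.py | productOfEvenNums
-- ===== SOURCE A (Python) =====
-- def productOfEvenNums(i, lst):
--     if i == len(lst):
--         return None
--
--     product = productOfEvenNums(i + 1, lst)
--
--     if lst[i] % 2 != 0:
--         return product
--     if product == None:
--         return lst[i]
--
--     return lst[i] * product
-- ===== SOURCE B (Python) =====
-- def productOfEvenNums(i, lst):
--     evens = [lst[j] for j in range(i, len(lst)) if lst[j] % 2 == 0]
--     if not evens:
--         return None
--     p = 1
--     for x in evens:
--         p *= x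
--     return p
-- ===== Notes on version B (the rewrite author's own statement) =====
-- stated objective: alternative
-- what changed: Replaces A's None-threading tail recursion by two staged passes: first collect the even elements of positions i..len-1 into a list, then multiply them with a plain accumulator starting at 1 (None only when the collected list is empty).
import Mathlib
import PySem

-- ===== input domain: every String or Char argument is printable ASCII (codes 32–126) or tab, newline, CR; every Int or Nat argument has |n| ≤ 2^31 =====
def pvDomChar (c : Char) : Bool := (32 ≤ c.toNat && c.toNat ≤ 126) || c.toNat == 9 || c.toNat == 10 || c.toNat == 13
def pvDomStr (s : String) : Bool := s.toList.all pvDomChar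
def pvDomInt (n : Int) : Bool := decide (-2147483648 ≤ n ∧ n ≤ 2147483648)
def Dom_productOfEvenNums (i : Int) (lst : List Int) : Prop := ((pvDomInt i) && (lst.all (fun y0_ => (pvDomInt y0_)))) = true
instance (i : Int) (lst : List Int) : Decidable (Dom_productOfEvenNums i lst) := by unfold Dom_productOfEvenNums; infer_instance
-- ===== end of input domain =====

-- B replaces A's None-threading tail recursion by two staged passes: collect the even elements of lst[i:len-1] (Python indexing), then multiply them with an accumulator starting at 1 (objective: alternative, same cost).

-- ===== PORT A =====
-- fuel = number of remaining recursive steps until i reaches len(lst); fuel 0 is the 'i == len(lst)' base case.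
def pvGoA (lst : List Int) : Nat → Int → Option Int
  | 0, _ => none
  | fuel + 1, i =>
    let product := pvGoA lst fuel (i + 1)
    match PySem.List.pyGet? lst i with
    | none => none   -- IndexError in Python; outside Pre_
    | some x =>
      if PySem.Int.mod x 2 ≠ 0 then product
      else match product with
        | none => some x
        | some p => some (x * p)

def productOfEvenNums (i : Int) (lst : List Int) : Option Int :=
  pvGoA lst ((lst.length : Int) - i).toNat i

-- ===== PORT B =====
-- the comprehension [lst[j] for j in range(i, len(lst)) if lst[j] % 2 == 0]; none = IndexError (outside Pre_)
def pvCollect (lst : List Int) : List Int → Option (List Int)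
  | [] => some []
  | j :: js =>
    match PySem.List.pyGet? lst j with
    | none => none
    | some x =>
      match pvCollect lst js with
      | none => none
      | some es => some (if PySem.Int.mod x 2 = 0 then x :: es else es)

def productOfEvenNums_alt (i : Int) (lst : List Int) : Option Int :=
  match pvCollect lst (PySem.List.pyRange i (lst.length : Int) 1) with
  | none => none
  | some [] => none                                   -- if not evens: return None
  | some es => some (es.foldl (· * ·) 1)              -- p = 1; for x in evens: p *= x

-- ===== PRECONDITION & SPEC =====
-- Pre_ excludes only inputs where A does not return: i > len(lst) (unbounded recursion, RecursionError)
-- and i < -len(lst) (IndexError while unwinding).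
def Pre_productOfEvenNums (i : Int) (lst : List Int) : Prop :=
  -(lst.length : Int) ≤ i ∧ i ≤ (lst.length : Int)
instance (i : Int) (lst : List Int) : Decidable (Pre_productOfEvenNums i lst) := by
  unfold Pre_productOfEvenNums; infer_instance

def pvWitness_productOfEvenNums : Int × List Int := (0, [2, 3, 4])

def Spec_productOfEvenNums (i : Int) (lst : List Int) (out : Option Int) : Prop := out = productOfEvenNums_alt i lst
instance (i : Int) (lst : List Int) (out : Option Int) : Decidable (Spec_productOfEvenNums i lst out) := by unfold Spec_productOfEvenNums; infer_instance

-- ===== CLAIM (what is proved, stated in full; the proofs are below) =====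
def Claim_equal_productOfEvenNums : Prop := ∀ (i : Int) (lst : List Int), Dom_productOfEvenNums i lst → Pre_productOfEvenNums i lst → Spec_productOfEvenNums i lst (productOfEvenNums i lst)

-- ===== LEMMAS AND PROOFS =====

-- abstract form of A's None-threading combination over a list of (already filtered) even elements
def pvProdA : List Int → Option Int
  | [] => none
  | x :: xs =>
    match pvProdA xs with
    | none => some x
    | some p => some (x * p)

theorem pv_foldl_mul (xs : List Int) : ∀ a : Int, xs.foldl (· * ·) a = a * xs.foldl (· * ·) 1 := by
  induction xs with
  | nil => intro a; simp [List.foldl]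
  | cons y ys ih =>
    intro a
    simp only [List.foldl]
    rw [ih (a * y), ih (1 * y)]
    ring

-- A's combination equals B's left-fold product (multiplication on Int is associative and commutative)
theorem pvProdA_eq (es : List Int) :
    pvProdA es = if es = [] then none else some (es.foldl (· * ·) 1) := by
  induction es with
  | nil => rfl
  | cons x xs ih =>
    simp only [pvProdA, ih]
    cases xs with
    | nil => simp [List.foldl]
    | cons y ys =>
      rw [if_neg (List.cons_ne_nil y ys), if_neg (List.cons_ne_nil x (y :: ys))]
      show some (x * List.foldl (· * ·) 1 (y :: ys)) = some (List.foldl (· * ·) (1 * x) (y :: ys))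
      rw [pv_foldl_mul (y :: ys) (1 * x)]
      norm_num

-- core invariant: with fuel = len - j, A's recursion from j equals pvProdA of the evens B collects from j
theorem pv_key (lst : List Int) : ∀ (n : Nat) (j : Int),
    -(lst.length : Int) ≤ j → (lst.length : Int) - j = n →
    ∃ es, pvCollect lst (PySem.List.pyRange j (lst.length : Int) 1) = some es ∧
          pvGoA lst n j = pvProdA es := by
  intro n
  induction n with
  | zero =>
    intro j _ hj
    refine ⟨[], ?_, rfl⟩
    rw [PySem.List.pyRange_one_eq_nil (by omega)]
    rfl
  | succ n ih =>
    intro j h0 hj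
    have hlt : j < (lst.length : Int) := by omega
    obtain ⟨x, hx⟩ : ∃ x, PySem.List.pyGet? lst j = some x := by
      cases h : PySem.List.pyGet? lst j with
      | some x => exact ⟨x, rfl⟩
      | none =>
        rw [PySem.List.pyGet?_eq_none_iff] at h
        simp only [PySem.Raise.InRange] at h
        omega
    obtain ⟨es, hc, hg⟩ := ih (j + 1) (by omega) (by omega)
    rw [PySem.List.pyRange_one_cons hlt]
    refine ⟨if PySem.Int.mod x 2 = 0 then x :: es else es, ?_, ?_⟩
    · simp only [pvCollect, hx, hc]
    · simp only [pvGoA, hx, hg]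
      by_cases he : PySem.Int.mod x 2 = 0
      · rw [if_neg (not_not.mpr he), if_pos he]
        simp only [pvProdA]
      · rw [if_pos he, if_neg he]

-- ===== VERDICT (by name: the statement is the Claim_ definition above) =====
theorem productOfEvenNums_spec : Claim_equal_productOfEvenNums := by
  intro i lst _ hpre
  obtain ⟨h1, h2⟩ := hpre
  obtain ⟨es, hc, hg⟩ := pv_key lst ((lst.length : Int) - i).toNat i h1 (by omega)
  unfold Spec_productOfEvenNums productOfEvenNums productOfEvenNums_alt
  rw [hc, hg, pvProdA_eq]
  cases es <;> simp
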